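-- pv_equiv track=rewrite | github.com/evjohnston/public_openalex | step6_openalex_institutions_enriching.py | process_associated_institutions
-- ===== SOURCE A (Python) =====
-- from typing import Dict, List, Any, Optional
--
-- def process_associated_institutions(associated_institutions: List[Dict[str, Any]]) -> Dict[str, List[str]]:
--     """
--     Process associated institutions and separate them by relationship type
--     """
--     children = []
--     children_ids = []
--     parents = []
--     parents_ids = []
--
--     if associated_institutions:
--         for inst in associated_institutions:
--             if inst.get('relationship') == 'child':
--                 children.append(inst.get('display_name', ''))
--                 children_ids.append(inst.get('id', ''))
--             elif inst.get('relationship') == 'parent':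
--                 parents.append(inst.get('display_name', ''))
--                 parents_ids.append(inst.get('id', ''))
--
--     return {
--         'children': '; '.join(children) if children else '',
--         'children_ids': '; '.join(children_ids) if children_ids else '',
--         'parents': '; '.join(parents) if parents else '',
--         'parents_ids': '; '.join(parents_ids) if parents_ids else ''
--     }
-- ===== SOURCE B (Python) =====
-- from typing import Dict, List, Any
--
-- def process_associated_institutions(associated_institutions: List[Dict[str, Any]]) -> Dict[str, List[str]]:
--     insts = associated_institutions or []
--     children = [i.get('display_name', '') for i in insts if i.get('relationship') == 'child']
--     children_ids = [i.get('id', '') for i in insts if i.get('relationship') == 'child']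
--     parents = [i.get('display_name', '') for i in insts if i.get('relationship') == 'parent']
--     parents_ids = [i.get('id', '') for i in insts if i.get('relationship') == 'parent']
--     return {
--         'children': '; '.join(children),
--         'children_ids': '; '.join(children_ids),
--         'parents': '; '.join(parents),
--         'parents_ids': '; '.join(parents_ids),
--     }
-- ===== Notes on version B (the rewrite author's own statement) =====
-- stated objective: idiomatic
-- what changed: Replaces the single branch-and-append loop maintaining four accumulators with four independent filtered comprehensions, and drops the redundant 'if list else ""' guards since joining an empty list already yields ''.
import Mathlib
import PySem

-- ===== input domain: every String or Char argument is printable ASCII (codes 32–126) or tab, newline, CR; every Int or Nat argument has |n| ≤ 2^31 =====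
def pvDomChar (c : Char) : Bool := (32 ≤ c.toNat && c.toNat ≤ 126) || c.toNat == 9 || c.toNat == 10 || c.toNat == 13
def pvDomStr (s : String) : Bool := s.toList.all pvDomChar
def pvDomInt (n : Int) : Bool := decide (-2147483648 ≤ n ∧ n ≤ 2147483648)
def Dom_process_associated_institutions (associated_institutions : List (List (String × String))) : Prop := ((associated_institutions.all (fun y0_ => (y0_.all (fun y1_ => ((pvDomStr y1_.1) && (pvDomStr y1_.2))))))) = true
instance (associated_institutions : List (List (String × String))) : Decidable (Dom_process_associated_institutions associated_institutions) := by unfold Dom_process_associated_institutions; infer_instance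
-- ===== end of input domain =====

-- B replaces A's single branch-and-append loop by four independent filtered scans (idiomatic decomposition; same O(n) cost).

-- dict.get k  (first-match lookup under the association-list convention; exact for Python dicts, which have unique keys)
def pyGet (d : List (String × String)) (k : String) : Option String :=
  (d.find? (fun p => p.1 == k)).map (·.2)

-- dict.get k dflt
def pyGetDflt (d : List (String × String)) (k dflt : String) : String :=
  match pyGet d k with
  | some v => v
  | none => dflt

-- ===== PORT A =====
def paiStep (acc : List String × List String × List String × List String)
    (inst : List (String × String)) : List String × List String × List String × List String :=
  let (c, ci, p, pi) := acc
  if pyGet inst "relationship" = some "child" then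
    (c ++ [pyGetDflt inst "display_name" ""], ci ++ [pyGetDflt inst "id" ""], p, pi)
  else if pyGet inst "relationship" = some "parent" then
    (c, ci, p ++ [pyGetDflt inst "display_name" ""], pi ++ [pyGetDflt inst "id" ""])
  else acc

def process_associated_institutions (associated_institutions : List (List (String × String))) : List (String × String) :=
  let r := associated_institutions.foldl paiStep ([], [], [], [])
  let c := r.1; let ci := r.2.1; let p := r.2.2.1; let pi := r.2.2.2
  [("children", if c = [] then "" else PySem.Str.join "; " c),
   ("children_ids", if ci = [] then "" else PySem.Str.join "; " ci),
   ("parents", if p = [] then "" else PySem.Str.join "; " p),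
   ("parents_ids", if pi = [] then "" else PySem.Str.join "; " pi)]

-- ===== PORT B =====
def process_associated_institutions_alt (associated_institutions : List (List (String × String))) : List (String × String) :=
  let children := (associated_institutions.filter (fun i => pyGet i "relationship" == some "child")).map
    (fun i => pyGetDflt i "display_name" "")
  let children_ids := (associated_institutions.filter (fun i => pyGet i "relationship" == some "child")).map
    (fun i => pyGetDflt i "id" "")
  let parents := (associated_institutions.filter (fun i => pyGet i "relationship" == some "parent")).map
    (fun i => pyGetDflt i "display_name" "")
  let parents_ids := (associated_institutions.filter (fun i => pyGet i "relationship" == some "parent")).map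
    (fun i => pyGetDflt i "id" "")
  [("children", PySem.Str.join "; " children),
   ("children_ids", PySem.Str.join "; " children_ids),
   ("parents", PySem.Str.join "; " parents),
   ("parents_ids", PySem.Str.join "; " parents_ids)]

-- ===== PRECONDITION & SPEC =====
def Spec_process_associated_institutions (associated_institutions : List (List (String × String))) (out : List (String × String)) : Prop := out = process_associated_institutions_alt associated_institutions
instance (associated_institutions : List (List (String × String))) (out : List (String × String)) : Decidable (Spec_process_associated_institutions associated_institutions out) := by unfold Spec_process_associated_institutions; infer_instance

-- ===== CLAIM (what is proved, stated in full; the proofs are below) =====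
def Claim_equal_process_associated_institutions : Prop := ∀ (associated_institutions : List (List (String × String))), Dom_process_associated_institutions associated_institutions → Spec_process_associated_institutions associated_institutions (process_associated_institutions associated_institutions)

-- ===== LEMMAS AND PROOFS =====

-- A's fold extends each accumulator by exactly the corresponding filtered-and-mapped scan of B.
theorem paiFold_eq (l : List (List (String × String)))
    (c ci p pi : List String) :
    l.foldl paiStep (c, ci, p, pi) =
      (c ++ (l.filter (fun i => pyGet i "relationship" == some "child")).map (fun i => pyGetDflt i "display_name" ""),
       ci ++ (l.filter (fun i => pyGet i "relationship" == some "child")).map (fun i => pyGetDflt i "id" ""),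
       p ++ (l.filter (fun i => pyGet i "relationship" == some "parent")).map (fun i => pyGetDflt i "display_name" ""),
       pi ++ (l.filter (fun i => pyGet i "relationship" == some "parent")).map (fun i => pyGetDflt i "id" "")) := by
  induction l generalizing c ci p pi with
  | nil => simp
  | cons x xs ih =>
    simp only [List.foldl_cons, List.filter_cons, paiStep]
    by_cases h1 : pyGet x "relationship" = some "child"
    · simp [h1, ih]
    · by_cases h2 : pyGet x "relationship" = some "parent"
      · simp [h2, ih]
      · simp [h1, h2, ih]

theorem join_empty (sep : String) : PySem.Str.join sep [] = "" := rfl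

-- ===== VERDICT (by name: the statement is the Claim_ definition above) =====
theorem process_associated_institutions_spec : Claim_equal_process_associated_institutions := by
  intro l _
  show process_associated_institutions l = process_associated_institutions_alt l
  unfold process_associated_institutions process_associated_institutions_alt
  rw [paiFold_eq]
  simp only [List.nil_append]
  congr 1 <;> [skip; congr 1] <;> [skip; skip; congr 1] <;>
    first
    | rfl
    | (congr 1
       split
       · next h => rw [h, join_empty]
       · rfl)
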